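-- pv_equiv track=rewrite | github.com/Otsgolyak/lastchance | calc_frequency_26.py | calc_frequency
-- ===== SOURCE A (Python) =====
-- def calc_frequency(lst):
--
--     a = 0
--     b = 0
--     c = 0
--
--     for n in lst:
--
--         if n == (-1):
--             a = a+1
--         elif n == 0:
--             b = b+1
--         elif n == 1:
--             c = c+1
--
--     if a>b and a>c:
--             return a
--     if b>a and b>c:
--             return b
--     if c>a and c>b:
--         return c
--     else:
--         return None
-- ===== SOURCE B (Python) =====
-- def _run_lengths(xs):
--     runs = []
--     n = 0
--     prev = None
--     for x in xs:
--         if n and x == prev: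
--             n += 1
--         else:
--             if n:
--                 runs.append(n)
--             n = 1
--             prev = x
--     if n:
--         runs.append(n)
--     return runs
--
--
-- def calc_frequency(lst):
--     rel = sorted(x for x in lst if x in (-1, 0, 1))
--     runs = _run_lengths(rel)
--     if not runs:
--         return None
--     m = max(runs)
--     return m if runs.count(m) == 1 else None
-- ===== Notes on version B (the rewrite author's own statement) =====
-- stated objective: alternative
-- what changed: Instead of one fused counting loop plus a cascaded three-way strict-comparison chain, B sorts the relevant elements (-1/0/1), scans the sorted list once for run lengths, and returns the run length that is the unique maximum (None when there is no unique maximal run).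
import Mathlib
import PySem

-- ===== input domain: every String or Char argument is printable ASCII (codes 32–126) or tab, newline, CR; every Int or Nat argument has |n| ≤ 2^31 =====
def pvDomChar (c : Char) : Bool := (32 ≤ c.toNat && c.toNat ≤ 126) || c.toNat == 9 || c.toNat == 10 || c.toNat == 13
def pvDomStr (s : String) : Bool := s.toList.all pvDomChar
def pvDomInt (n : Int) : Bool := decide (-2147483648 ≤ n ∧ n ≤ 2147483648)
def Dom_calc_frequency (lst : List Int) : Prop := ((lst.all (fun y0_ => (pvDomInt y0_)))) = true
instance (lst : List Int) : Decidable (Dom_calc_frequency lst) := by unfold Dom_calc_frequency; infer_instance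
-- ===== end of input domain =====

-- B replaces A's fused counting loop + cascaded strict-comparison chain by a different algorithm:
-- sort the relevant elements, scan run lengths, and return the run length that is a unique maximum
-- (objective: alternative).

-- ===== PORT A =====
-- loop accumulating (a, b, c) in order, then the cascaded comparison chain, as in A
def calc_frequency (lst : List Int) : Option Int :=
  let s := lst.foldl (fun (s : Int × Int × Int) n =>
    if n = -1 then (s.1 + 1, s.2.1, s.2.2)
    else if n = 0 then (s.1, s.2.1 + 1, s.2.2)
    else if n = 1 then (s.1, s.2.1, s.2.2 + 1)
    else s) (0, 0, 0)
  let a := s.1; let b := s.2.1; let c := s.2.2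
  if a > b ∧ a > c then some a
  else if b > a ∧ b > c then some b
  else if c > a ∧ c > b then some c
  else none

-- ===== PORT B =====
-- _run_lengths: one pass with state (runs, n, prev); prev is only consulted when n ≠ 0
-- (Python's prev = None start is represented by n = 0 guarding the prev comparison)
def pvRunStep (s : List Int × Int × Int) (x : Int) : List Int × Int × Int :=
  if s.2.1 ≠ 0 ∧ x = s.2.2 then (s.1, s.2.1 + 1, s.2.2)
  else ((if s.2.1 ≠ 0 then s.1 ++ [s.2.1] else s.1), 1, x)

def pvRunLengths (xs : List Int) : List Int :=
  match xs.foldl pvRunStep ([], 0, 0) with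
  | (runs, n, _) => if n ≠ 0 then runs ++ [n] else runs

def calc_frequency_alt (lst : List Int) : Option Int :=
  let rel := PySem.List.sorted (lst.filter fun x => x == -1 || x == 0 || x == 1) (fun x => x) false
  let runs := pvRunLengths rel
  if runs = [] then none
  else
    let m := (PySem.List.max? runs (fun x => x)).getD 0
    if PySem.List.count runs m == 1 then some m else none

-- ===== PRECONDITION & SPEC =====
def Spec_calc_frequency (lst : List Int) (out : Option Int) : Prop := out = calc_frequency_alt lst
instance (lst : List Int) (out : Option Int) : Decidable (Spec_calc_frequency lst out) := by unfold Spec_calc_frequency; infer_instance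

-- ===== CLAIM =====
def Claim_equal_calc_frequency : Prop := ∀ (lst : List Int), Dom_calc_frequency lst → Spec_calc_frequency lst (calc_frequency lst)

-- ===== LEMMAS AND PROOFS =====

-- A's loop computes the three counts
theorem pv_fold_counts (lst : List Int) (a b c : Int) :
    lst.foldl (fun (s : Int × Int × Int) n =>
      if n = -1 then (s.1 + 1, s.2.1, s.2.2)
      else if n = 0 then (s.1, s.2.1 + 1, s.2.2)
      else if n = 1 then (s.1, s.2.1, s.2.2 + 1)
      else s) (a, b, c)
    = (a + (lst.count (-1) : Int), b + (lst.count 0 : Int), c + (lst.count 1 : Int)) := by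
  induction lst generalizing a b c with
  | nil => simp
  | cons x t ih =>
    simp only [List.foldl_cons]
    split_ifs with h1 h0 h2 <;> simp [ih, *] <;> omega

-- sorting the relevant elements yields the three constant blocks
theorem pv_sorted_blocks (lst : List Int) :
    PySem.List.sorted (lst.filter fun x => x == -1 || x == 0 || x == 1) (fun x => x) false
      = List.replicate (lst.count (-1)) (-1) ++ List.replicate (lst.count 0) 0
          ++ List.replicate (lst.count 1) 1 := by
  apply PySem.List.sorted_id_eq_of_perm_of_pairwise
  · rw [List.perm_iff_count]
    intro v
    by_cases h1 : v = -1
    · subst h1; simp [List.count_filter, List.count_replicate]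
    · by_cases h0 : v = 0
      · subst h0; simp [List.count_filter, List.count_replicate]
      · by_cases h2 : v = 1
        · subst h2; simp [List.count_filter, List.count_replicate]
        · rw [List.count_eq_zero.mpr, List.count_eq_zero.mpr]
          · intro hmem
            have := List.of_mem_filter hmem
            simp [h1, h0, h2] at this
          · simp [List.mem_replicate, h1, h0, h2]
  · simp only [List.pairwise_append, List.pairwise_replicate, List.mem_replicate]
    refine ⟨⟨Or.inr le_rfl, Or.inr le_rfl, ?_⟩, Or.inr le_rfl, ?_⟩
    · rintro x ⟨-, rfl⟩ y ⟨-, rfl⟩; omega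
    · rintro x hx y ⟨-, rfl⟩
      rcases List.mem_append.mp hx with hx | hx <;>
        rcases List.mem_replicate.mp hx with ⟨-, rfl⟩ <;> omega

-- the run scan inside a block of the current value
theorem pv_run_steady (k : Nat) (v n : Int) (runs : List Int) (hn : 0 < n) :
    (List.replicate k v).foldl pvRunStep (runs, n, v) = (runs, n + k, v) := by
  induction k generalizing n with
  | zero => simp
  | succ k ih =>
    rw [List.replicate_succ, List.foldl_cons]
    have hstep : pvRunStep (runs, n, v) v = (runs, n + 1, v) := by
      simp [pvRunStep, show n ≠ 0 by omega]
    rw [hstep, ih (n + 1) (by omega)]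
    refine Prod.ext rfl (Prod.ext ?_ rfl)
    push_cast; ring

-- the run scan entering a fresh block
theorem pv_run_fresh (k : Nat) (v n p : Int) (runs : List Int) (hk : 0 < k)
    (h : n = 0 ∨ p ≠ v) :
    (List.replicate k v).foldl pvRunStep (runs, n, p)
      = ((if n ≠ 0 then runs ++ [n] else runs), (k : Int), v) := by
  obtain ⟨k', rfl⟩ : ∃ k', k = k' + 1 := ⟨k - 1, by omega⟩
  rw [List.replicate_succ, List.foldl_cons]
  have hno : ¬ ((n, p).1 ≠ 0 ∧ v = (n, p).2) := by
    rintro ⟨hn0, rfl⟩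
    rcases h with h | h
    · exact hn0 h
    · exact h rfl
  have hstep : pvRunStep (runs, n, p) v
      = ((if n ≠ 0 then runs ++ [n] else runs), 1, v) := by
    simp only [pvRunStep, if_neg hno]
  rw [hstep, pv_run_steady k' v 1 _ (by omega)]
  refine Prod.ext rfl (Prod.ext ?_ rfl)
  push_cast; ring

-- run lengths of the three blocks
theorem pv_runs_blocks (a b c : Nat) :
    pvRunLengths (List.replicate a (-1) ++ List.replicate b 0 ++ List.replicate c 1)
      = (if 0 < a then [(a : Int)] else []) ++ (if 0 < b then [(b : Int)] else [])
          ++ (if 0 < c then [(c : Int)] else []) := by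
  unfold pvRunLengths
  rw [List.foldl_append, List.foldl_append]
  rcases Nat.eq_zero_or_pos a with ha | ha <;> rcases Nat.eq_zero_or_pos b with hb | hb <;>
    rcases Nat.eq_zero_or_pos c with hc | hc
  · simp [ha, hb, hc]
  · subst ha hb
    simp only [List.replicate_zero, List.foldl_nil]
    rw [pv_run_fresh c 1 0 0 [] hc (Or.inl rfl)]
    split_ifs <;> simp_all <;> omega
  · subst ha hc
    simp only [List.replicate_zero, List.foldl_nil]
    rw [pv_run_fresh b 0 0 0 [] hb (Or.inl rfl)]
    split_ifs <;> simp_all <;> omega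
  · subst ha
    simp only [List.replicate_zero, List.foldl_nil]
    rw [pv_run_fresh b 0 0 0 [] hb (Or.inl rfl),
        pv_run_fresh c 1 (b:Int) 0 (if (0:Int) ≠ 0 then [] ++ [(0:Int)] else []) hc (Or.inr (by decide))]
    split_ifs <;> simp_all <;> omega
  · subst hb hc
    simp only [List.replicate_zero, List.foldl_nil]
    rw [pv_run_fresh a (-1) 0 0 [] ha (Or.inl rfl)]
    split_ifs <;> simp_all <;> omega
  · subst hb
    simp only [List.replicate_zero, List.foldl_nil]
    rw [pv_run_fresh a (-1) 0 0 [] ha (Or.inl rfl),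
        pv_run_fresh c 1 (a:Int) (-1) (if (0:Int) ≠ 0 then [] ++ [(0:Int)] else []) hc (Or.inr (by decide))]
    split_ifs <;> simp_all <;> omega
  · subst hc
    simp only [List.replicate_zero, List.foldl_nil]
    rw [pv_run_fresh a (-1) 0 0 [] ha (Or.inl rfl),
        pv_run_fresh b 0 (a:Int) (-1) (if (0:Int) ≠ 0 then [] ++ [(0:Int)] else []) hb (Or.inr (by decide))]
    split_ifs <;> simp_all <;> omega
  · rw [pv_run_fresh a (-1) 0 0 [] ha (Or.inl rfl),
        pv_run_fresh b 0 (a:Int) (-1) (if (0:Int) ≠ 0 then [] ++ [(0:Int)] else []) hb (Or.inr (by decide)),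
        pv_run_fresh c 1 (b:Int) 0 _ hc (Or.inr (by decide))]
    split_ifs <;> simp_all <;> omega

-- B's final step, named for the case analysis (definitionally the tail of calc_frequency_alt)
def pvPick (runs : List Int) : Option Int :=
  if runs = [] then none
  else
    let m := (PySem.List.max? runs (fun x => x)).getD 0
    if PySem.List.count runs m == 1 then some m else none

theorem pv_pick1 (x : Int) : pvPick [x] = some x := by
  unfold pvPick
  rw [PySem.List.max?_id_cons]
  simp [PySem.List.count_eq]

theorem pv_pick2 (x y : Int) : pvPick [x, y] = if x = y then none else some (max x y) := by
  unfold pvPick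
  rw [PySem.List.max?_id_cons]
  simp only [List.foldl_cons, List.foldl_nil, Option.getD_some, PySem.List.count_eq,
    List.count_cons, List.count_nil, beq_iff_eq, max_def]
  split_ifs <;> first | rfl | omega | (simp only [Option.some.injEq, reduceCtorEq]; omega)

theorem pv_pick3 (x y z : Int) :
    pvPick [x, y, z] =
      (if x > y ∧ x > z then some x
       else if y > x ∧ y > z then some y
       else if z > x ∧ z > y then some z
       else none) := by
  unfold pvPick
  rw [PySem.List.max?_id_cons]
  simp only [List.foldl_cons, List.foldl_nil, Option.getD_some, PySem.List.count_eq,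
    List.count_cons, List.count_nil, beq_iff_eq, max_def]
  split_ifs <;> first | rfl | omega | (simp only [Option.some.injEq, reduceCtorEq]; omega)

-- A's cascaded strict chain equals B's unique-maximal-run selection, per counts
theorem pv_chain_eq (a b c : Nat) :
    (if (a : Int) > b ∧ (a : Int) > c then some (a : Int)
     else if (b : Int) > a ∧ (b : Int) > c then some (b : Int)
     else if (c : Int) > a ∧ (c : Int) > b then some (c : Int)
     else none)
    = pvPick ((if 0 < a then [(a : Int)] else []) ++ (if 0 < b then [(b : Int)] else [])
          ++ (if 0 < c then [(c : Int)] else [])) := by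
  rcases Nat.eq_zero_or_pos a with ha | ha <;> rcases Nat.eq_zero_or_pos b with hb | hb <;>
    rcases Nat.eq_zero_or_pos c with hc | hc <;>
    simp only [ha, hb, hc, if_pos, if_true, if_false, Nat.lt_irrefl, List.nil_append,
      List.append_nil, List.cons_append, List.singleton_append]
  all_goals
    first
      | ((first | rw [pv_pick1] | rw [pv_pick2] | rw [pv_pick3]) <;>
           split_ifs <;>
           first | rfl | omega | (simp only [Option.some.injEq, reduceCtorEq]; omega) | simp_all)
      | (simp [pvPick]; done)
      | simp [pvPick]

theorem pv_main (lst : List Int) : calc_frequency lst = calc_frequency_alt lst := by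
  show _ = pvPick (pvRunLengths (PySem.List.sorted _ _ _))
  unfold calc_frequency
  rw [pv_fold_counts, pv_sorted_blocks, pv_runs_blocks]
  simpa using pv_chain_eq (lst.count (-1)) (lst.count 0) (lst.count 1)

-- ===== VERDICT =====
theorem calc_frequency_spec : Claim_equal_calc_frequency := by
  intro lst _
  exact pv_main lst
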